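-- pv_equiv track=rewrite | github.com/Woijech/HIS | lab1/src/bitarith/ieee754.py | _find_binary_exponent
-- ===== SOURCE A (Python) =====
-- def _cmp_scaled_pow2(num: int, den10_pow: int, e2: int) -> int:
--     """
--     Compare num/10^den10_pow with 2^e2.
--
--     Returns:
--       -1 if num/10^den10_pow < 2^e2
--        0 if equal
--        1 if greater
--
--     The comparison is purely integer-based, without float:
--       - for e2>=0 compare num ? (10^den10_pow)*2^e2
--       - for e2<0 compare num*2^{-e2} ? 10^den10_pow
--     """
--     if e2 >= 0:
--         rhs = (10**den10_pow) << e2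
--         if num < rhs:
--             return -1
--         if num > rhs:
--             return 1
--         return 0
--
--     lhs = num << (-e2)
--     rhs = 10**den10_pow
--     if lhs < rhs:
--         return -1
--     if lhs > rhs:
--         return 1
--     return 0
--
-- def _find_binary_exponent(num: int, den10_pow: int) -> int:
--     """
--     Find e such that:
--         2^e <= num/10^den10_pow < 2^(e+1)
--     assuming num>0.
--
--     Uses:
--       - bit_length-based estimate (coarse log2)
--       - then while-loop correction with exact comparisons via _cmp_scaled_pow2.
--
--     This yields the normalization binary exponent needed for IEEE754.
--     """
--     den = 10**den10_pow
--     e = (num.bit_length() - 1) - (den.bit_length() - 1)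
--     while _cmp_scaled_pow2(num, den10_pow, e) < 0:
--         e -= 1
--     while _cmp_scaled_pow2(num, den10_pow, e + 1) >= 0:
--         e += 1
--     return e
-- ===== SOURCE B (Python) =====
-- def _find_binary_exponent(num: int, den10_pow: int) -> int:
--     # Closed form: e = floor(log2(num/10^den10_pow)), computed with one shift,
--     # one integer division and two bit_length calls; no correction loops.
--     den = 10 ** den10_pow
--     shift = den.bit_length()
--     g = (num << shift) // den
--     return (g.bit_length() - 1) - shift
-- ===== Notes on version B (the rewrite author's own statement) =====
-- stated objective: simpler
-- what changed: Replaces A's bit_length estimate plus two exact-comparison correction while-loops (and the _cmp_scaled_pow2 helper, which recomputes 10**den10_pow * 2^e on every probe) by a closed form: scale num by 2^den.bit_length(), divide once by 10**den10_pow, and read the exponent off the quotient's bit_length.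
import Mathlib
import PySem

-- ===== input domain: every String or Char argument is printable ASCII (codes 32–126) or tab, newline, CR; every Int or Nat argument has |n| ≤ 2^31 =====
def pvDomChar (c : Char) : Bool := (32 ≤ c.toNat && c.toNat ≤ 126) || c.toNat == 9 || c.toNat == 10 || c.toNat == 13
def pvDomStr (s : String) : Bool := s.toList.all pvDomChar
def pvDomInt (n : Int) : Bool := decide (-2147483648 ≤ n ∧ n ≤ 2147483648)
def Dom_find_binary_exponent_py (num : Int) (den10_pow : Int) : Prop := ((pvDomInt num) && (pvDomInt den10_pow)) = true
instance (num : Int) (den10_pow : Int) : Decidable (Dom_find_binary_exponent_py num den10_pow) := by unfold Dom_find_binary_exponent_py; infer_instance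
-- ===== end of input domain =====

-- B replaces A's estimate-then-correct loops by a closed form (one shift, one
-- integer division, two bit_length calls); objective: simpler.

-- ===== PORT A =====
-- hand-port of int.bit_length (exact for every Int; proved equal to
-- PySem.Int.bitLength below): tail-recursive so that large values evaluate
-- without overflowing the interpreter stack.
def pyBitLenAux (acc m : Nat) : Nat :=
  if h : m = 0 then acc else pyBitLenAux (acc + 1) (m / 2)
termination_by m
decreasing_by exact Nat.div_lt_self (Nat.pos_of_ne_zero h) (by norm_num)

def pyBitLength (n : Int) : Nat := pyBitLenAux 0 n.natAbs

-- port of _cmp_scaled_pow2; '10**den10_pow' is (10:Int) ^ den10_pow.toNat (for a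
-- negative exponent Python yields a float and A then raises; Pre_ excludes that).
def cmp_scaled_pow2_py (num : Int) (den10_pow : Int) (e2 : Int) : Int :=
  if e2 ≥ 0 then
    let rhs : Int := ((10:Int) ^ den10_pow.toNat) <<< e2.toNat
    if num < rhs then -1 else if num > rhs then 1 else 0
  else
    let lhs : Int := num <<< (-e2).toNat
    let rhs : Int := (10:Int) ^ den10_pow.toNat
    if lhs < rhs then -1 else if lhs > rhs then 1 else 0

-- A's two while-loops, made total with fuel; the fuel passed below is proved
-- sufficient under Pre_, so inside Pre_ they run exactly like Python's loops.
def fbeLoop1 : Nat → Int → Int → Int → Int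
  | 0, _, _, e => e
  | fuel + 1, num, den10_pow, e =>
    if cmp_scaled_pow2_py num den10_pow e < 0 then fbeLoop1 fuel num den10_pow (e - 1) else e

def fbeLoop2 : Nat → Int → Int → Int → Int
  | 0, _, _, e => e
  | fuel + 1, num, den10_pow, e =>
    if cmp_scaled_pow2_py num den10_pow (e + 1) ≥ 0 then fbeLoop2 fuel num den10_pow (e + 1) else e

def find_binary_exponent_py (num : Int) (den10_pow : Int) : Int :=
  let den : Int := (10:Int) ^ den10_pow.toNat
  let e : Int := ((pyBitLength num : Int) - 1) - ((pyBitLength den : Int) - 1)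
  let fuel : Nat := pyBitLength num + pyBitLength den + 2
  fbeLoop2 fuel num den10_pow (fbeLoop1 fuel num den10_pow e)

-- ===== PORT B =====
def find_binary_exponent_py_alt (num : Int) (den10_pow : Int) : Int :=
  let den : Int := (10:Int) ^ den10_pow.toNat
  let shift : Nat := pyBitLength den
  let g : Int := PySem.Int.floordiv (num <<< shift) den
  ((pyBitLength g : Int) - 1) - (shift : Int)

-- ===== PRECONDITION & SPEC =====
-- Pre_ excludes num ≤ 0 (A's first correction loop never terminates there: the exact
-- comparison always returns -1) and den10_pow < 0 (Python's 10**den10_pow is then a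
-- float, so den.bit_length() raises AttributeError).
def Pre_find_binary_exponent_py (num : Int) (den10_pow : Int) : Prop :=
  1 ≤ num ∧ 0 ≤ den10_pow
instance (num : Int) (den10_pow : Int) : Decidable (Pre_find_binary_exponent_py num den10_pow) := by unfold Pre_find_binary_exponent_py; infer_instance

def pvWitness_find_binary_exponent_py : Int × Int := (314159, 5)

def Spec_find_binary_exponent_py (num : Int) (den10_pow : Int) (out : Int) : Prop := out = find_binary_exponent_py_alt num den10_pow
instance (num : Int) (den10_pow : Int) (out : Int) : Decidable (Spec_find_binary_exponent_py num den10_pow out) := by unfold Spec_find_binary_exponent_py; infer_instance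

-- ===== CLAIM (what is proved, stated in full; the proofs are below) =====
def Claim_equal_find_binary_exponent_py : Prop := ∀ (num : Int) (den10_pow : Int), Dom_find_binary_exponent_py num den10_pow → Pre_find_binary_exponent_py num den10_pow → Spec_find_binary_exponent_py num den10_pow (find_binary_exponent_py num den10_pow)

-- ===== LEMMAS AND PROOFS =====

-- 'num / 10^p ≥ 2^e', phrased multiplicatively over Int: den·2^e⁺ ≤ num·2^e⁻.
def fbeOk (num den : Int) (e : Int) : Prop := den * 2 ^ e.toNat ≤ num * 2 ^ (-e).toNat

theorem pyBitLenAux_eq (m acc : Nat) : pyBitLenAux acc m = acc + PySem.Int.bitLength (m : Int) := by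
  induction m using Nat.strong_induction_on generalizing acc with
  | _ m ih =>
    rcases Nat.eq_zero_or_pos m with h | h
    · subst h
      rw [pyBitLenAux]
      simp [PySem.Int.bitLength_zero]
    · rw [pyBitLenAux, dif_neg (by omega), ih (m / 2) (Nat.div_lt_self h (by norm_num)),
        PySem.Int.bitLength_natCast (m := m) h]
      omega

theorem pyBitLength_eq (n : Int) : pyBitLength n = PySem.Int.bitLength n := by
  rw [pyBitLength, pyBitLenAux_eq]
  have : PySem.Int.bitLength ((n.natAbs : Nat) : Int) = PySem.Int.bitLength n := by
    rcases Int.natAbs_eq n with h | h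
    · rw [← h]
    · rw [show ((n.natAbs : Nat) : Int) = -n from by omega, PySem.Int.bitLength_neg]
  omega

theorem fbeOk_succ (num den : Int) (hn : 0 < num) (hd : 0 < den) (e : Int)
    (h : fbeOk num den (e + 1)) : fbeOk num den e := by
  unfold fbeOk at h ⊢
  by_cases he : 0 ≤ e
  · have h1 : (e + 1).toNat = e.toNat + 1 := by omega
    have h2 : (-(e + 1)).toNat = 0 := by omega
    have h3 : (-e).toNat = 0 := by omega
    rw [h1, h2] at h; rw [h3]
    have := pow_pos (by norm_num : (0:Int) < 2) e.toNat
    rw [pow_succ] at h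
    nlinarith
  · have h1 : (e + 1).toNat = 0 := by omega
    have h2 : e.toNat = 0 := by omega
    have h3 : (-e).toNat = (-(e + 1)).toNat + 1 := by omega
    rw [h1] at h; rw [h2, h3]
    have := pow_pos (by norm_num : (0:Int) < 2) (-(e+1)).toNat
    rw [pow_succ]
    nlinarith

theorem fbeOk_sub (num den : Int) (L B : Nat) :
    fbeOk num den ((L : Int) - (B : Int)) ↔ den * 2 ^ L ≤ num * 2 ^ B := by
  unfold fbeOk
  have hpB := pow_pos (by norm_num : (0:Int) < 2) B
  have hpL := pow_pos (by norm_num : (0:Int) < 2) L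
  by_cases h : B ≤ L
  · have h1 : ((L : Int) - B).toNat = L - B := by omega
    have h2 : (-((L : Int) - B)).toNat = 0 := by omega
    have hL : (2:Int) ^ L = 2 ^ (L - B) * 2 ^ B := by rw [← pow_add]; congr 1; omega
    rw [h1, h2, hL, pow_zero, mul_one, ← mul_assoc]
    constructor
    · intro hh; exact mul_le_mul_of_nonneg_right hh (le_of_lt hpB)
    · intro hh; exact le_of_mul_le_mul_right hh hpB
  · have h1 : ((L : Int) - B).toNat = 0 := by omega
    have h2 : (-((L : Int) - B)).toNat = B - L := by omega
    have hB : (2:Int) ^ B = 2 ^ (B - L) * 2 ^ L := by rw [← pow_add]; congr 1; omega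
    rw [h1, h2, hB, pow_zero, mul_one, ← mul_assoc]
    constructor
    · intro hh; exact mul_le_mul_of_nonneg_right hh (le_of_lt hpL)
    · intro hh; exact le_of_mul_le_mul_right hh hpL

theorem fbeOk_low (num den : Int) (hn : 0 < num) (hd : 0 < den) :
    fbeOk num den (-(PySem.Int.bitLength den : Int)) := by
  unfold fbeOk
  have h1 : (-(PySem.Int.bitLength den : Int)).toNat = 0 := by omega
  have h2 : (- -(PySem.Int.bitLength den : Int)).toNat = PySem.Int.bitLength den := by omega
  rw [h1, h2, pow_zero, mul_one]
  have h3 := PySem.Int.lt_two_pow_bitLength den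
  have h4 : (den.natAbs : Int) < (2:Int) ^ PySem.Int.bitLength den := by exact_mod_cast h3
  have h5 : (den.natAbs : Int) = den := Int.natAbs_of_nonneg (le_of_lt hd)
  nlinarith [pow_pos (by norm_num : (0:Int) < 2) (PySem.Int.bitLength den)]

theorem fbeOk_high (num den : Int) (hn : 0 < num) (hd : 0 < den) :
    ¬ fbeOk num den ((PySem.Int.bitLength num : Int)) := by
  unfold fbeOk
  have h1 : ((PySem.Int.bitLength num : Int)).toNat = PySem.Int.bitLength num := by omega
  have h2 : (-(PySem.Int.bitLength num : Int)).toNat = 0 := by omega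
  rw [h1, h2, pow_zero, mul_one]
  have h3 := PySem.Int.lt_two_pow_bitLength num
  have h4 : (num.natAbs : Int) < (2:Int) ^ PySem.Int.bitLength num := by exact_mod_cast h3
  have h5 : (num.natAbs : Int) = num := Int.natAbs_of_nonneg (le_of_lt hn)
  intro hc
  nlinarith [pow_pos (by norm_num : (0:Int) < 2) (PySem.Int.bitLength num)]

-- _cmp_scaled_pow2's sign is exactly the fbeOk comparison
theorem cmp_iff (num den10_pow e : Int) :
    (cmp_scaled_pow2_py num den10_pow e < 0 ↔ ¬ fbeOk num ((10:Int) ^ den10_pow.toNat) e)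
    ∧ (cmp_scaled_pow2_py num den10_pow e ≥ 0 ↔ fbeOk num ((10:Int) ^ den10_pow.toNat) e) := by
  unfold cmp_scaled_pow2_py fbeOk
  by_cases he : e ≥ 0
  · have h3 : (-e).toNat = 0 := by omega
    rw [if_pos he]
    simp only [Int.shiftLeft_eq, h3, pow_zero, mul_one]
    constructor <;> · split_ifs with h1 h2 <;> norm_num <;> linarith
  · have h3 : e.toNat = 0 := by omega
    rw [if_neg he]
    simp only [Int.shiftLeft_eq, h3, pow_zero, mul_one]
    constructor <;> · split_ifs with h1 h2 <;> norm_num <;> linarith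

-- B's result brackets num/10^p between consecutive powers of two
theorem alt_ok (num den10_pow : Int) (hn : 1 ≤ num) :
    fbeOk num ((10:Int) ^ den10_pow.toNat) (find_binary_exponent_py_alt num den10_pow) ∧
    ¬ fbeOk num ((10:Int) ^ den10_pow.toNat) (find_binary_exponent_py_alt num den10_pow + 1) := by
  set den : Int := (10:Int) ^ den10_pow.toNat with hden
  have hd : 0 < den := by positivity
  set shift : Nat := pyBitLength den with hshift
  set M : Int := num <<< shift with hM
  set g : Int := PySem.Int.floordiv M den with hg
  have hMeq : M = num * 2 ^ shift := Int.shiftLeft_eq num shift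
  have hpow := pow_pos (by norm_num : (0:Int) < 2) shift
  have hdenlt : den < 2 ^ shift := by
    have h3 := PySem.Int.lt_two_pow_bitLength den
    rw [← pyBitLength_eq den] at h3
    have h4 : (den.natAbs : Int) < (2:Int) ^ shift := by exact_mod_cast h3
    have h5 : (den.natAbs : Int) = den := Int.natAbs_of_nonneg (le_of_lt hd)
    linarith
  have hg1 : 1 ≤ g := by
    rw [hg, PySem.Int.le_floordiv_iff_mul_le hd, one_mul, hMeq]
    nlinarith
  have hbr := (PySem.Int.floordiv_eq_iff_of_pos (a := M) (b := den) (q := g) hd).mp hg.symm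
  obtain ⟨hlo, hhi⟩ := hbr
  set bg : Nat := pyBitLength g with hbg
  have hglt : g < 2 ^ bg := by
    have h3 := PySem.Int.lt_two_pow_bitLength g
    rw [← pyBitLength_eq g] at h3
    have h4 : (g.natAbs : Int) < (2:Int) ^ bg := by exact_mod_cast h3
    have h5 : (g.natAbs : Int) = g := Int.natAbs_of_nonneg (by omega)
    linarith
  have hbg1 : 1 ≤ bg := by
    rcases Nat.eq_zero_or_pos bg with h | h
    · exfalso; rw [h, pow_zero] at hglt; omega
    · exact h
  have hgle : (2:Int) ^ (bg - 1) ≤ g := by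
    have h3 := PySem.Int.two_pow_bitLength_le g (by omega)
    rw [← pyBitLength_eq g] at h3
    have h4 : ((2:Nat) ^ (bg - 1) : Int) ≤ (g.natAbs : Int) := by exact_mod_cast h3
    have h5 : (g.natAbs : Int) = g := Int.natAbs_of_nonneg (by omega)
    push_cast at h4
    have h6 : |g| = g := abs_of_nonneg (by omega)
    linarith
  have halt : find_binary_exponent_py_alt num den10_pow = ((bg - 1 : Nat) : Int) - (shift : Int) := by
    show ((bg : Int) - 1) - (shift : Int) = _
    omega
  constructor
  · rw [halt, fbeOk_sub num den]
    rw [← hMeq]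
    calc den * 2 ^ (bg - 1) ≤ den * g := by nlinarith
      _ ≤ M := by linarith [hlo, mul_comm g den]
  · have halt1 : find_binary_exponent_py_alt num den10_pow + 1 = ((bg : Nat) : Int) - (shift : Int) := by
      rw [halt]; omega
    rw [halt1, fbeOk_sub num den, ← hMeq]
    intro hc
    have hg2 : g + 1 ≤ 2 ^ bg := by omega
    nlinarith

-- any bracketing e* characterises fbeOk as a down-set
theorem fbeOk_iff_le (num den : Int) (hn : 0 < num) (hd : 0 < den) (estar : Int)
    (h1 : fbeOk num den estar) (h2 : ¬ fbeOk num den (estar + 1)) :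
    ∀ f : Int, fbeOk num den f ↔ f ≤ estar := by
  intro f
  constructor
  · intro hf
    by_contra hgt
    push Not at hgt
    have : ¬ fbeOk num den f := by
      refine Int.le_induction (m := estar + 1)
        (motive := fun n _ => ¬ fbeOk num den n) h2 ?_ f (by omega)
      intro n _ ih hc
      exact ih (fbeOk_succ num den hn hd n hc)
    exact this hf
  · intro hle
    refine Int.le_induction_down (m := estar)
      (motive := fun n _ => fbeOk num den n) h1 ?_ f hle
    intro n _ ih
    have heq : (n - 1) + 1 = n := by ring
    exact fbeOk_succ num den hn hd (n - 1) (by rw [heq]; exact ih)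

theorem fbeLoop1_le (num den10_pow : Int) (estar : Int)
    (hiff : ∀ f : Int, fbeOk num ((10:Int) ^ den10_pow.toNat) f ↔ f ≤ estar)
    (fuel : Nat) (e : Int) (he : e ≤ estar) :
    fbeLoop1 (fuel + 1) num den10_pow e = e := by
  show (if cmp_scaled_pow2_py num den10_pow e < 0 then fbeLoop1 fuel num den10_pow (e - 1) else e) = e
  rw [if_neg]
  rw [(cmp_iff num den10_pow e).1]
  push Not at *
  exact (hiff e).mpr he

theorem fbeLoop1_ge (num den10_pow : Int) (estar : Int)
    (hiff : ∀ f : Int, fbeOk num ((10:Int) ^ den10_pow.toNat) f ↔ f ≤ estar) :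
    ∀ (fuel : Nat) (e : Int), estar ≤ e → (e - estar).toNat ≤ fuel →
    fbeLoop1 fuel num den10_pow e = estar := by
  intro fuel
  induction fuel with
  | zero =>
    intro e h1 h2
    have : e = estar := by omega
    rw [this]; rfl
  | succ f ih =>
    intro e h1 h2
    by_cases heq : e = estar
    · rw [heq]
      exact fbeLoop1_le num den10_pow estar hiff f estar le_rfl
    · show (if cmp_scaled_pow2_py num den10_pow e < 0 then fbeLoop1 f num den10_pow (e - 1) else e) = estar
      rw [if_pos]
      · exact ih (e - 1) (by omega) (by omega)
      · rw [(cmp_iff num den10_pow e).1, hiff e]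
        omega

theorem fbeLoop2_eq (num den10_pow : Int) (estar : Int)
    (hiff : ∀ f : Int, fbeOk num ((10:Int) ^ den10_pow.toNat) f ↔ f ≤ estar) :
    ∀ (fuel : Nat) (e : Int), e ≤ estar → (estar - e).toNat ≤ fuel →
    fbeLoop2 fuel num den10_pow e = estar := by
  intro fuel
  induction fuel with
  | zero =>
    intro e h1 h2
    have : e = estar := by omega
    rw [this]; rfl
  | succ f ih =>
    intro e h1 h2
    by_cases heq : e = estar
    · subst heq
      show (if cmp_scaled_pow2_py num den10_pow (e + 1) ≥ 0 then fbeLoop2 f num den10_pow (e + 1) else e) = e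
      rw [if_neg]
      rw [(cmp_iff num den10_pow (e + 1)).2, hiff (e + 1)]
      omega
    · show (if cmp_scaled_pow2_py num den10_pow (e + 1) ≥ 0 then fbeLoop2 f num den10_pow (e + 1) else e) = estar
      rw [if_pos]
      · exact ih (e + 1) (by omega) (by omega)
      · rw [(cmp_iff num den10_pow (e + 1)).2, hiff (e + 1)]
        omega

-- ===== VERDICT (by name: the statement is the Claim_ definition above) =====
theorem find_binary_exponent_py_spec : Claim_equal_find_binary_exponent_py := by
  intro num den10_pow _ hpre
  obtain ⟨hn1, hp⟩ := hpre
  unfold Spec_find_binary_exponent_py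
  have hn : 0 < num := hn1
  set den : Int := (10:Int) ^ den10_pow.toNat with hden
  have hd : 0 < den := by positivity
  set estar : Int := find_binary_exponent_py_alt num den10_pow with hestar
  obtain ⟨hok, hnot⟩ := alt_ok num den10_pow hn1
  have hiff := fbeOk_iff_le num den hn hd estar hok hnot
  set bn : Nat := pyBitLength num with hbn
  set bd : Nat := pyBitLength den with hbd
  have hlow : -(bd : Int) ≤ estar := by
    have h := (hiff _).mp (fbeOk_low num den hn hd)
    rw [← pyBitLength_eq den] at h
    exact h
  have hhigh : estar < (bn : Int) := by
    by_contra hc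
    refine fbeOk_high num den hn hd ((hiff _).mpr ?_)
    rw [← pyBitLength_eq num]
    omega
  have hA : find_binary_exponent_py num den10_pow =
      fbeLoop2 (bn + bd + 2) num den10_pow
        (fbeLoop1 (bn + bd + 2) num den10_pow (((bn : Int) - 1) - ((bd : Int) - 1))) := rfl
  rw [hA]
  set e0 : Int := ((bn : Int) - 1) - ((bd : Int) - 1) with he0
  by_cases hcase : e0 ≤ estar
  · have hL1 : fbeLoop1 (bn + bd + 2) num den10_pow e0 =  e0 :=
      fbeLoop1_le num den10_pow estar hiff (bn + bd + 1) e0 hcase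
    rw [hL1]
    exact fbeLoop2_eq num den10_pow estar hiff (bn + bd + 2) e0 hcase (by omega)
  · have hL1 : fbeLoop1 (bn + bd + 2) num den10_pow e0 = estar :=
      fbeLoop1_ge num den10_pow estar hiff (bn + bd + 2) e0 (by omega) (by omega)
    rw [hL1]
    exact fbeLoop2_eq num den10_pow estar hiff (bn + bd + 2) estar le_rfl (by omega)
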